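-- pv_equiv track=rewrite | github.com/yash85763/Agentic_AI | task_planning/Auto_CoT.py | has_valid_reasoning_structure
-- ===== SOURCE A (Python) =====
-- def has_valid_reasoning_structure(reasoning: str) -> bool:
--     """Check if reasoning has valid step-by-step structure"""
--     reasoning_indicators = [
--         'first', 'second', 'then', 'next', 'so', 'therefore',
--         'thus', 'because', 'since', 'step', 'now'
--     ]
--
--     words = reasoning.lower().split()
--     indicator_count = sum(1 for word in words if word in reasoning_indicators)
--
--     # At least 2 reasoning indicators for valid structure
--     return indicator_count >= 2
-- ===== SOURCE B (Python) =====
-- def has_valid_reasoning_structure(reasoning: str) -> bool: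
--     """Check if reasoning has valid step-by-step structure"""
--     reasoning_indicators = [
--         'first', 'second', 'then', 'next', 'so', 'therefore',
--         'thus', 'because', 'since', 'step', 'now'
--     ]
--     counts = {}
--     for w in reasoning.lower().split():
--         counts[w] = counts.get(w, 0) + 1
--     total = 0
--     for ind in reasoning_indicators:
--         total += counts.get(ind, 0)
--     return total >= 2
-- ===== Notes on version B (the rewrite author's own statement) =====
-- stated objective: idiomatic
-- what changed: B builds a Counter of the words once and then iterates over the fixed indicator list, summing each indicator's frequency, instead of scanning every word and testing membership in the indicator list.
import Mathlib
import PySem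

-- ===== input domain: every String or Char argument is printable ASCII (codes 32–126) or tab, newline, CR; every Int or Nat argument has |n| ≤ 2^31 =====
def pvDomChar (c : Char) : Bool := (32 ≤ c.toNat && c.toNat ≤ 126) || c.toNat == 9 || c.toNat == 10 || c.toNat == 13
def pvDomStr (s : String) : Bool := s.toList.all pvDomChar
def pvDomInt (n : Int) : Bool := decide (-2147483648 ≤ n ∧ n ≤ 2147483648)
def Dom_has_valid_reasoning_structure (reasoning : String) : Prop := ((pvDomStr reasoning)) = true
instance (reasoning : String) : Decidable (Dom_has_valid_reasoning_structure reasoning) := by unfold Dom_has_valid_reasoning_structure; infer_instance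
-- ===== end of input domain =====

-- B replaces A's per-word membership scan by a frequency table built once, then sums
-- the indicators' frequencies; objective: idiomatic (same result, word counting by dict).

def reasoningIndicators : List String :=
  ["first", "second", "then", "next", "so", "therefore",
   "thus", "because", "since", "step", "now"]

-- ===== PORT A =====
-- words = reasoning.lower().split(); indicator_count = sum(1 for word in words if word in indicators)
def has_valid_reasoning_structure (reasoning : String) : Bool :=
  let words := PySem.Str.split₀ (PySem.Str.lower reasoning)
  let indicator_count : Int :=
    words.foldl (fun acc word => if word ∈ reasoningIndicators then acc + 1 else acc) 0
  decide (2 ≤ indicator_count)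

-- ===== PORT B =====
-- counts = {}; for w in words: counts[w] = counts.get(w,0)+1; total = Σ counts.get(ind,0)
def has_valid_reasoning_structure_alt (reasoning : String) : Bool :=
  let counts : PySem.Dict String Int :=
    (PySem.Str.split₀ (PySem.Str.lower reasoning)).foldl
      (fun d w => d.insert w (d.getD w 0 + 1)) PySem.Dict.empty
  let total : Int :=
    reasoningIndicators.foldl (fun acc ind => acc + counts.getD ind 0) 0
  decide (2 ≤ total)

-- ===== PRECONDITION & SPEC =====
def Spec_has_valid_reasoning_structure (reasoning : String) (out : Bool) : Prop := out = has_valid_reasoning_structure_alt reasoning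
instance (reasoning : String) (out : Bool) : Decidable (Spec_has_valid_reasoning_structure reasoning out) := by unfold Spec_has_valid_reasoning_structure; infer_instance

-- ===== CLAIM (what is proved, stated in full; the proofs are below) =====
def Claim_equal_has_valid_reasoning_structure : Prop := ∀ (reasoning : String), Dom_has_valid_reasoning_structure reasoning → Spec_has_valid_reasoning_structure reasoning (has_valid_reasoning_structure reasoning)

-- ===== LEMMAS AND PROOFS =====

-- A's loop counts (as an Int) the words satisfying the membership predicate.
theorem foldl_if_count (words : List String) (acc : Int) :
    words.foldl (fun a w => if w ∈ reasoningIndicators then a + 1 else a) acc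
      = acc + (words.countP (fun w => decide (w ∈ reasoningIndicators)) : Int) := by
  induction words generalizing acc with
  | nil => simp
  | cons w ws ih =>
    simp only [List.foldl_cons, List.countP_cons, ih]
    by_cases h : w ∈ reasoningIndicators <;> simp [h] <;> push_cast <;> ring

-- B's second loop sums the multiplicities of the indicators.
theorem foldl_add_count (words : List String) (inds : List String) (acc : Int) :
    inds.foldl (fun a i => a + (words.count i : Int)) acc
      = acc + (inds.map (fun i => (words.count i : Int))).sum := by
  induction inds generalizing acc with
  | nil => simp
  | cons i is ih => simp [List.foldl_cons, ih]; ring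

-- For a duplicate-free indicator list, the summed multiplicities equal A's count.
theorem countP_mem_cons (words : List String) (i : String) (is : List String)
    (h : i ∉ is) :
    words.countP (fun w => decide (w ∈ i :: is))
      = words.count i + words.countP (fun w => decide (w ∈ is)) := by
  induction words with
  | nil => simp
  | cons w ws ih =>
    simp only [List.countP_cons, List.count_cons, ih]
    by_cases hw : w = i
    · subst hw
      simp [h]
      omega
    · by_cases hm : w ∈ is <;> simp [hw, hm] <;> omega

theorem sum_count_eq_countP (inds : List String) (words : List String)
    (h : inds.Nodup) :
    (inds.map (fun i => (words.count i : Int))).sum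
      = (words.countP (fun w => decide (w ∈ inds)) : Int) := by
  induction inds with
  | nil => simp
  | cons i is ih =>
    rcases List.nodup_cons.mp h with ⟨hi, his⟩
    rw [List.map_cons, List.sum_cons, ih his, countP_mem_cons words i is hi]
    push_cast
    ring

-- ===== VERDICT (by name: the statement is the Claim_ definition above) =====
theorem has_valid_reasoning_structure_spec : Claim_equal_has_valid_reasoning_structure := by
  intro reasoning _
  unfold Spec_has_valid_reasoning_structure
  unfold has_valid_reasoning_structure has_valid_reasoning_structure_alt
  simp only [PySem.Dict.foldl_insert_getD_add_one_eq_counter, PySem.Dict.getD_counter]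
  rw [foldl_if_count, foldl_add_count,
    sum_count_eq_countP _ _ (by decide : reasoningIndicators.Nodup)]
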